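-- pv_equiv track=rewrite | github.com/ch2ohchohch2oh66/Scripts | algorithm/realTest.py | update_lights
-- ===== SOURCE A (Python) =====
-- def update_lights(currentState, days):
--     n = len(currentState)
--     for _ in range(days):
--         new_state = [0] * n
--         for i in range(n):
--             if i in [0, n - 1]:
--                 new_state[i] = 1
--             else:
--                 if currentState[i - 1] == currentState[i + 1]:
--                     new_state[i] = 0
--                 else:
--                     new_state[i] = 1
--         currentState = new_state
--     return currentState
-- ===== SOURCE B (Python) =====
-- def _step(s):
--     n = len(s)
--     if n == 0:
--         return []
--     if n == 1:
--         return [1]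
--     return [1] + [0 if a == b else 1 for a, b in zip(s, s[2:])] + [1]
--
-- def update_lights(currentState, days):
--     state = list(currentState)
--     seen = {}
--     history = []
--     d = 0
--     while d < days:
--         key = tuple(state)
--         if key in seen:
--             i = seen[key]
--             p = d - i
--             return history[i + (days - i) % p]
--         seen[key] = d
--         history.append(state)
--         state = _step(state)
--         d += 1
--     return state
-- ===== Notes on version B (the rewrite author's own statement) =====
-- stated objective: alternative
-- what changed: B replaces the day-by-day simulation with cycle detection: it memoizes each state's first occurrence in a dict and, on the first repeated state, jumps straight to history[i + (days - i) % period]; each day's state is built from a zip of the state with its own 2-shift instead of an indexed scan into a preallocated list.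
import Mathlib
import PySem

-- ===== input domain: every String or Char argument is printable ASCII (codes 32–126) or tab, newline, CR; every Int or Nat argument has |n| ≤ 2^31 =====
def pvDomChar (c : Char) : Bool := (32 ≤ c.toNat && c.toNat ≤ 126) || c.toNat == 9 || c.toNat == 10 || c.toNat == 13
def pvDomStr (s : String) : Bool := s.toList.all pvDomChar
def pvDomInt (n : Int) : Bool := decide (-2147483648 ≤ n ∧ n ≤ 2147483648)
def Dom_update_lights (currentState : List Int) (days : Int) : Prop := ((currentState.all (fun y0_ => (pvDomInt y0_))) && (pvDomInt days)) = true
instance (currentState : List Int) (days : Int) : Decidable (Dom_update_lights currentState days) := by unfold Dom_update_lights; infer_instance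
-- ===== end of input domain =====

-- B replaces the day-by-day simulation with cycle detection: memoize each state's first day and, on the first repeat, jump by the period (an alternative algorithm; same worst-case cost).

-- ===== PORT A =====
-- one day of A's inner loop: new_state = [0]*n; for i in range(n): …
def stepA (cur : List Int) : List Int :=
  (PySem.List.pyRange 0 (cur.length : Int) 1).foldl
    (fun ns i =>
      ns.set i.toNat
        (if i = 0 ∨ i = (cur.length : Int) - 1 then 1
         else if PySem.List.pyGet? cur (i - 1) = PySem.List.pyGet? cur (i + 1) then 0 else 1))
    (List.replicate ((cur.length : Int)).toNat 0)

def update_lights (currentState : List Int) (days : Int) : List Int :=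
  (PySem.List.pyRange 0 days 1).foldl (fun cur _ => stepA cur) currentState

-- ===== PORT B =====
-- _step from Source B: boundary 1s around a zip of the state with its own 2-shift
def stepB (s : List Int) : List Int :=
  match s with
  | [] => []
  | [_] => [1]
  | _ => [1] ++ ((s.zip (s.drop 2)).map (fun ab => if ab.1 = ab.2 then 0 else 1)) ++ [1]

-- the while loop of Source B: d counts days done, seen maps a state to its first day, hist lists past states
def altLoop (daysN d : Nat) (state : List Int) (seen : PySem.Dict (List Int) Nat)
    (hist : List (List Int)) : List Int :=
  if _h : d < daysN then
    match seen.get? state with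
    | some i => hist.getD (i + (daysN - i) % (d - i)) []
    | none => altLoop daysN (d + 1) (stepB state) (seen.insert state d) (hist ++ [state])
  else state
termination_by daysN - d

def update_lights_alt (currentState : List Int) (days : Int) : List Int :=
  altLoop days.toNat 0 currentState PySem.Dict.empty []

-- ===== PRECONDITION & SPEC =====
def Spec_update_lights (currentState : List Int) (days : Int) (out : List Int) : Prop := out = update_lights_alt currentState days
instance (currentState : List Int) (days : Int) (out : List Int) : Decidable (Spec_update_lights currentState days out) := by unfold Spec_update_lights; infer_instance

-- ===== CLAIM (what is proved, stated in full; the proofs are below) =====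
def Claim_equal_update_lights : Prop := ∀ (currentState : List Int) (days : Int), Dom_update_lights currentState days → Spec_update_lights currentState days (update_lights currentState days)

-- ===== LEMMAS AND PROOFS =====

-- a loop ignoring its index is function iteration
theorem foldl_const_iterate {α β : Type} (g : α → α) (l : List β) (init : α) :
    l.foldl (fun x _ => g x) init = g^[l.length] init := by
  induction l generalizing init with
  | nil => rfl
  | cons b l ih => simp [List.foldl_cons, ih, Function.iterate_succ_apply]

-- filling [0]*n by index over range(m) is a map over the indices
theorem foldl_set_range (g : Nat → Int) (n : Nat) :
    ∀ (m : Nat) (init : List Int), init.length = n → m ≤ n →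
      (List.range m).foldl (fun ns k => ns.set k (g k)) init
        = (List.range m).map g ++ init.drop m := by
  intro m
  induction m with
  | zero => intro init _ _; simp
  | succ m ih =>
      intro init hlen hm
      rw [List.range_succ, List.foldl_append, ih init hlen (by omega)]
      have hdrop : init.drop m = init[m] :: init.drop (m + 1) :=
        (List.drop_eq_getElem_cons (by omega)).trans rfl
      rw [hdrop]
      simp only [List.foldl_cons, List.foldl_nil]
      rw [List.set_append_right _ _ (by simp)]
      rw [show m - (List.map g (List.range m)).length = 0 by simp, List.set_cons_zero]
      simp

-- the value A writes at index k of one day's new state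
def cellA (s : List Int) (k : Nat) : Int :=
  if (k : Int) = 0 ∨ (k : Int) = (s.length : Int) - 1 then 1
  else if PySem.List.pyGet? s ((k : Int) - 1) = PySem.List.pyGet? s ((k : Int) + 1) then 0 else 1

theorem stepA_eq_map (s : List Int) :
    stepA s = (List.range s.length).map (fun k => cellA s k) := by
  unfold stepA
  rw [PySem.List.pyRange_one, List.foldl_map]
  simp only [Int.sub_zero, Int.toNat_natCast, Int.zero_add]
  refine (foldl_set_range (fun k => cellA s k) s.length s.length
        (List.replicate s.length 0) (by simp) (le_refl _)).trans ?_
  simp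

theorem map_cellA_eq_stepB (s : List Int) :
    (List.range s.length).map (fun k => cellA s k) = stepB s := by
  match s with
  | [] => rfl
  | [x] => simp [stepB, cellA, List.range_succ]
  | a :: b :: t =>
      have hstep : stepB (a :: b :: t)
          = 1 :: ((((a :: b :: t).zip t).map (fun ab => if ab.1 = ab.2 then 0 else 1)) ++ [1]) := rfl
      have hz : ((a :: b :: t).zip t).length = t.length := by
        simp only [List.length_zip, List.length_cons]
        omega
      have hn : (a :: b :: t).length = t.length + 2 := by simp
      apply List.ext_getElem
      · rw [hstep]; simp only [List.length_map, List.length_range, List.length_cons,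
          List.length_append, List.length_nil, hz]
      · intro k h1 h2
        simp only [List.getElem_map, List.getElem_range]
        have hk : k < t.length + 2 := by simp at h1; omega
        match k, hk with
        | 0, _ =>
            have hc : cellA (a :: b :: t) 0 = 1 := by simp [cellA]
            rw [hc]
            simp [hstep]
        | k + 1, _ =>
            by_cases hlast : k + 1 = t.length + 1
            · have hc : cellA (a :: b :: t) (k + 1) = 1 := by
                unfold cellA
                rw [if_pos]
                right
                rw [hn]
                push_cast
                omega
              rw [hc]
              simp only [hstep, List.getElem_cons_succ]
              rw [List.getElem_append_right (by rw [List.length_map, hz]; omega)]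
              simp
            · have hkmid : k < t.length := by omega
              have e1 : cellA (a :: b :: t) (k + 1)
                  = (if (a :: b :: t)[k]'(by simp; omega) = t[k]'hkmid then 0 else 1) := by
                unfold cellA
                rw [if_neg (by rw [hn]; push_cast; omega)]
                have g1 : ((k + 1 : Nat) : Int) - 1 = ((k : Nat) : Int) := by push_cast; ring
                have g2 : ((k + 1 : Nat) : Int) + 1 = ((k + 2 : Nat) : Int) := by push_cast; ring
                rw [g1, g2, PySem.List.pyGet?_natCast, PySem.List.pyGet?_natCast]
                rw [List.getElem?_eq_getElem (by simp; omega),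
                    List.getElem?_eq_getElem (by simp; omega)]
                simp
              rw [e1]
              simp only [hstep, List.getElem_cons_succ]
              rw [List.getElem_append_left (by rw [List.length_map, hz]; omega)]
              simp only [List.getElem_map]
              rw [List.getElem_zip]

theorem stepA_eq_stepB (s : List Int) : stepA s = stepB s := by
  rw [stepA_eq_map, map_cellA_eq_stepB]

-- iterated stepB is periodic once a repeat is found
theorem iterate_period (f : List Int → List Int) (s0 : List Int) (i p : Nat) (_hp : 0 < p)
    (hrep : f^[i + p] s0 = f^[i] s0) (m : Nat) :
    f^[i + m] s0 = f^[i + m % p] s0 := by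
  have shift : ∀ q r, f^[i + q * p + r] s0 = f^[i + r] s0 := by
    intro q
    induction q with
    | zero => intro r; simp
    | succ q ihq =>
        intro r
        have e : i + (q + 1) * p + r = r + (p + (i + q * p)) := by ring
        rw [e, Function.iterate_add_apply, Function.iterate_add_apply]
        have h1 : f^[i + q * p] s0 = f^[i] s0 := by simpa using ihq 0
        rw [h1]
        have h2 : f^[p] (f^[i] s0) = f^[i] s0 := by
          rw [← Function.iterate_add_apply, Nat.add_comm p i, hrep]
        rw [h2, ← Function.iterate_add_apply, Nat.add_comm r i]
  have hdm := Nat.div_add_mod m p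
  have e : i + m = i + (m / p) * p + m % p := by
    have : p * (m / p) = (m / p) * p := Nat.mul_comm _ _
    omega
  rw [e, shift]

theorem altLoop_correct (s0 : List Int) :
    ∀ (fuel daysN d : Nat) (state : List Int) (seen : PySem.Dict (List Int) Nat)
      (hist : List (List Int)),
      fuel = daysN - d → d ≤ daysN → state = stepB^[d] s0 →
      hist = (List.range d).map (fun k => stepB^[k] s0) →
      (∀ x i, seen.get? x = some i → i < d ∧ stepB^[i] s0 = x) →
      altLoop daysN d state seen hist = stepB^[daysN] s0 := by
  intro fuel
  induction fuel with
  | zero =>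
      intro daysN d state seen hist hfuel hd hstate hhist _
      subst hstate; subst hhist
      have hdd : d = daysN := by omega
      rw [altLoop]
      simp [hdd]
  | succ fuel ih =>
      intro daysN d state seen hist hfuel hd hstate hhist hseen
      subst hstate; subst hhist
      rw [altLoop]
      by_cases hlt : d < daysN
      · simp only [hlt, dif_pos]
        cases hget : seen.get? (stepB^[d] s0) with
        | none =>
            exact ih daysN (d + 1) (stepB (stepB^[d] s0)) (seen.insert (stepB^[d] s0) d)
              ((List.range d).map (fun k => stepB^[k] s0) ++ [stepB^[d] s0])
              (by omega) (by omega)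
              (Function.iterate_succ_apply' stepB d s0).symm
              (by rw [List.range_succ]; simp)
              (by
                intro x j hj
                by_cases hx : x = stepB^[d] s0
                · subst hx
                  rw [PySem.Dict.get?_insert_self] at hj
                  injection hj with hj'
                  exact ⟨by omega, by rw [← hj']⟩
                · rw [PySem.Dict.get?_insert_of_ne seen d hx] at hj
                  obtain ⟨h1', h2'⟩ := hseen x j hj
                  exact ⟨by omega, h2'⟩)
        | some i =>
            dsimp only
            obtain ⟨hi, hrep⟩ := hseen _ i hget
            have hp0 : 0 < d - i := by omega
            have hrep' : stepB^[i + (d - i)] s0 = stepB^[i] s0 := by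
              rw [show i + (d - i) = d by omega, hrep]
            have hper := iterate_period stepB s0 i (d - i) hp0 hrep' (daysN - i)
            have hidx : i + (daysN - i) % (d - i) < d := by
              have := Nat.mod_lt (daysN - i) hp0
              omega
            rw [List.getD_eq_getElem _ _ (by simp; omega)]
            simp only [List.getElem_map, List.getElem_range]
            rw [← hper, show i + (daysN - i) = daysN by omega]
      · simp [show d = daysN by omega]

-- ===== VERDICT (by name: the statement is the Claim_ definition above) =====
theorem update_lights_spec : Claim_equal_update_lights := by
  intro s days _
  unfold Spec_update_lights
  have hA : update_lights s days = stepB^[days.toNat] s := by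
    unfold update_lights
    rw [foldl_const_iterate stepA, PySem.List.length_pyRange_one,
        show stepA = stepB from funext stepA_eq_stepB]
    congr 1
    omega
  have hB : update_lights_alt s days = stepB^[days.toNat] s := by
    unfold update_lights_alt
    exact altLoop_correct s days.toNat days.toNat 0 s PySem.Dict.empty [] (by omega) (by omega)
      rfl (by simp) (by intro x i h; rw [PySem.Dict.get?_empty] at h; exact absurd h (by simp))
  rw [hA, hB]
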